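-- pv_equiv track=rewrite | github.com/anamarijapapic/uup-vjezbe | kolokviji-i-ispiti-rjesenja/2kol-priprema-rijeseno/2kol-zima-2017-18-A-F-rijeseno/2kol-zima-2017-18-e-zad1.py | izbaci
-- ===== SOURCE A (Python) =====
-- def izbaci(lista, listabool):
--     nova = []
--     cnt = 0
--     for broj, b in zip(lista, listabool): #zip() funkcija koja povezuje liste tako da su oni elementi
--     #koji imaju iste indekse zajedno u skupu na tom indeksu u novoj zip listi
--         if not b and cnt != 1: #ako je u listi booleana False i pod uvjetom da counter nije 1
--         #(jer ako je counter 1 znaci da jos nismo dosli do drugog True)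
--             nova.append(broj)
--         elif b:
--             cnt += 1 #kad nademo True u listi booleana povecavamo counter
--     return nova
-- ===== SOURCE B (Python) =====
-- def izbaci(lista, listabool):
--     # Split the zipped input around the first and second True flags:
--     # everything before the first True is kept, nothing between the first
--     # and second True is kept, and after the second True every False-flagged
--     # number is kept.
--     pairs = list(zip(lista, listabool))
--     flags = [b for _, b in pairs]
--     if True not in flags:
--         return [x for x, _ in pairs]
--     k = flags.index(True)
--     head = [x for x, _ in pairs[:k]]
--     restflags = flags[k + 1:]
--     if True not in restflags:
--         return head
--     j = restflags.index(True)
--     return head + [x for x, b in pairs[k + 1:][j + 1:] if not b]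
-- ===== Notes on version B (the rewrite author's own statement) =====
-- stated objective: alternative
-- what changed: Replaces A's single stateful loop with a running True-counter by a two-phase structure: locate the first and second True flags in the zipped list, then return the slice before the first True concatenated with the False-flagged elements after the second True.
import Mathlib
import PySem

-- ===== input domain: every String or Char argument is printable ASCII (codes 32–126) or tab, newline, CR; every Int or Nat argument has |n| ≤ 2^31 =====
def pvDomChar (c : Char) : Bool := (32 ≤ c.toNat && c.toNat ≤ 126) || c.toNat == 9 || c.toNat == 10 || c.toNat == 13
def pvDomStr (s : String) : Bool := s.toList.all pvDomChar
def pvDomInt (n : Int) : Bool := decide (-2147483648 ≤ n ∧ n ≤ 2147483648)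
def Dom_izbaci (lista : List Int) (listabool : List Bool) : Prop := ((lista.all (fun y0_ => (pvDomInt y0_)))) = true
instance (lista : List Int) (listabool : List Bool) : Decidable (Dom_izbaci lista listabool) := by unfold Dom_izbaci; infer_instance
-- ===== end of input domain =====

-- B replaces A's stateful counter loop by locating the first and second True
-- flags and concatenating the slices they delimit (objective: simpler two-phase
-- structure; same O(n) cost).

-- ===== PORT A =====
-- loop body of A's for-loop over zip(lista, listabool), state (nova, cnt)
def izbStep (st : List Int × Nat) (p : Int × Bool) : List Int × Nat :=
  if !p.2 && decide (st.2 ≠ 1) then (st.1 ++ [p.1], st.2)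
  else if p.2 then (st.1, st.2 + 1)
  else st

def izbaci (lista : List Int) (listabool : List Bool) : List Int :=
  (List.foldl izbStep ([], 0) (lista.zip listabool)).1

-- ===== PORT B =====
-- 'True in flags' + 'flags.index(True)' ported together as index? (first index of True,
-- none iff absent); slices with nonnegative bounds pairs[:k] / xs[k+1:] are take/drop (exact).
def izbaci_alt (lista : List Int) (listabool : List Bool) : List Int :=
  let pairs := lista.zip listabool
  let flags := pairs.map (fun p => p.2)
  match PySem.List.index? flags true with
  | none => pairs.map (fun p => p.1)
  | some k =>
    let head := (pairs.take k).map (fun p => p.1)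
    let restflags := flags.drop (k + 1)
    match PySem.List.index? restflags true with
    | none => head
    | some j =>
      head ++ (((pairs.drop (k + 1)).drop (j + 1)).filter (fun p => !p.2)).map (fun p => p.1)

-- ===== PRECONDITION & SPEC =====
def Spec_izbaci (lista : List Int) (listabool : List Bool) (out : List Int) : Prop := out = izbaci_alt lista listabool
instance (lista : List Int) (listabool : List Bool) (out : List Int) : Decidable (Spec_izbaci lista listabool out) := by unfold Spec_izbaci; infer_instance

-- ===== CLAIM (what is proved, stated in full; the proofs are below) =====
def Claim_equal_izbaci : Prop := ∀ (lista : List Int) (listabool : List Bool), Dom_izbaci lista listabool → Spec_izbaci lista listabool (izbaci lista listabool)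

-- ===== LEMMAS AND PROOFS =====

-- A's loop as structural recursion on the zipped list with the counter as argument
def izbF : List (Int × Bool) → Nat → List Int
  | [], _ => []
  | p :: r, c =>
    if !p.2 && decide (c ≠ 1) then p.1 :: izbF r c
    else izbF r (if p.2 then c + 1 else c)

theorem foldl_izbStep (L : List (Int × Bool)) :
    ∀ (acc : List Int) (c : Nat), (List.foldl izbStep (acc, c) L).1 = acc ++ izbF L c := by
  induction L with
  | nil => intro acc c; simp [izbF]
  | cons p r ih =>
    intro acc c
    by_cases hb : p.2
    · simp [izbStep, izbF, hb, ih]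
    by_cases hc : c = 1
    · simp [izbStep, izbF, hb, hc, ih]
    · simp [izbStep, izbF, hb, hc, ih]

theorem izbF_ge2 (L : List (Int × Bool)) :
    ∀ c : Nat, 2 ≤ c → izbF L c = (L.filter (fun p => !p.2)).map (fun p => p.1) := by
  induction L with
  | nil => intro c _; simp [izbF]
  | cons p r ih =>
    intro c hc
    by_cases hb : p.2
    · simp [izbF, hb, ih (c + 1) (by omega)]
    · have hc1 : c ≠ 1 := by omega
      simp [izbF, hb, hc1, ih c hc]

theorem izbF_one (L : List (Int × Bool)) :
    izbF L 1 = match PySem.List.index? (L.map (fun p => p.2)) true with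
      | none => []
      | some j => izbF (L.drop (j + 1)) 2 := by
  induction L with
  | nil => simp [izbF, PySem.List.index?]
  | cons p r ih =>
    by_cases hb : p.2
    · simp [izbF, hb, PySem.List.index?_eq_idxOf?, List.idxOf?_cons]
    · have : (p.2 : Bool) ≠ true := by simp [hb]
      rw [show (p :: r).map (fun p => p.2) = p.2 :: r.map (fun p => p.2) from rfl,
        PySem.List.index?_cons_of_ne _ this]
      simp only [izbF, hb, Bool.not_false, Bool.true_and, decide_eq_true_eq]
      cases h : PySem.List.index? (r.map (fun p => p.2)) true with
      | none => rw [PySem.List.index?_eq_idxOf?] at h; simp [ih, h]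
      | some j => rw [PySem.List.index?_eq_idxOf?] at h; simp [ih, h]

theorem izbF_zero (L : List (Int × Bool)) :
    izbF L 0 = match PySem.List.index? (L.map (fun p => p.2)) true with
      | none => L.map (fun p => p.1)
      | some k => (L.take k).map (fun p => p.1) ++ izbF (L.drop (k + 1)) 1 := by
  induction L with
  | nil => simp [izbF, PySem.List.index?]
  | cons p r ih =>
    by_cases hb : p.2
    · simp [izbF, hb, PySem.List.index?_eq_idxOf?, List.idxOf?_cons]
    · have : (p.2 : Bool) ≠ true := by simp [hb]
      rw [show (p :: r).map (fun p => p.2) = p.2 :: r.map (fun p => p.2) from rfl,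
        PySem.List.index?_cons_of_ne _ this]
      simp only [izbF, hb, Bool.not_false, Bool.true_and]
      cases h : PySem.List.index? (r.map (fun p => p.2)) true with
      | none => rw [PySem.List.index?_eq_idxOf?] at h; simp [ih, h]
      | some j => rw [PySem.List.index?_eq_idxOf?] at h; simp [ih, h, List.map_take]

theorem map_snd_drop (L : List (Int × Bool)) (n : Nat) :
    (L.map (fun p => p.2)).drop n = (L.drop n).map (fun p => p.2) := by
  simp [List.map_drop]

-- ===== VERDICT (by name: the statement is the Claim_ definition above) =====
theorem izbaci_spec : Claim_equal_izbaci := by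
  intro lista listabool _
  unfold Spec_izbaci izbaci izbaci_alt
  simp only
  rw [foldl_izbStep, List.nil_append, izbF_zero]
  cases h1 : PySem.List.index? ((lista.zip listabool).map (fun p => p.2)) true with
  | none => rfl
  | some k =>
    simp only
    rw [izbF_one, map_snd_drop]
    cases h2 : PySem.List.index? (((lista.zip listabool).drop (k + 1)).map (fun p => p.2)) true with
    | none => simp
    | some j =>
      simp only
      rw [izbF_ge2 _ 2 (le_refl 2)]
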